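-- pv_equiv track=rewrite | github.com/JeongInsang/Algorithm | SWEA/D3/4579. 세상의 모든 팰린드롬 2/세상의 모든 팰린드롬 2.py | func
-- ===== SOURCE A (Python) =====
-- def func(s):
--     reverse_s = s[::-1]
--     a, b = '', ''
--     for i in range(len(s)):
--         if s[i] == '*' or reverse_s[i] == '*':
--             break
--         a += s[i]
--         b += reverse_s[i]
--     if a == b:
--         return True
--     return False
-- ===== SOURCE B (Python) =====
-- def func(s):
--     r = s[::-1]
--     n = len(s)
--     p = s.find('*')
--     if p == -1:
--         p = n
--     q = r.find('*')
--     if q == -1: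
--         q = n
--     k = min(p, q)
--     return s[:k] == r[:k]
-- ===== Notes on version B (the rewrite author's own statement) =====
-- stated objective: faster
-- what changed: Replaces the character-by-character accumulation loop with a direct computation: find the first asterisk position in s and in its reversal via str.find (replacing -1 by len(s)), take k as the minimum, and compare the length-k prefixes of s and its reversal by slicing.
import Mathlib
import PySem

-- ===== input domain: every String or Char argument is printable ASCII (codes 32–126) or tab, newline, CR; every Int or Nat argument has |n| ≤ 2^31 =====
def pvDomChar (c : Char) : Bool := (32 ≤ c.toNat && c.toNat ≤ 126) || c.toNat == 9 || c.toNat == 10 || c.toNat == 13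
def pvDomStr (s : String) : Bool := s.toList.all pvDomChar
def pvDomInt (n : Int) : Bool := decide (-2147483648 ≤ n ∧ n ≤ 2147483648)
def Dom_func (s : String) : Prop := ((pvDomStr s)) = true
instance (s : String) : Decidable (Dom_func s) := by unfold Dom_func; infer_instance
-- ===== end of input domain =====

-- B replaces A's accumulation loop by k = min of the first '*' positions in s and
-- its reversal, then a single prefix comparison of the two length-k slices (simpler).

-- ===== PORT A =====
-- A walks index i over s and reverse_s in lockstep, breaking at the first '*';
-- we transcribe the loop as lockstep recursion over the two char lists with the
-- accumulators a, b as state (the lists have equal length, so the lockstep pattern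
-- covers exactly range(len(s))).
def funcGo : List Char → List Char → List Char → List Char → Bool
  | x :: xs, y :: ys, a, b =>
      if x = '*' || y = '*' then a == b
      else funcGo xs ys (a ++ [x]) (b ++ [y])
  | _, _, a, b => a == b

def func (s : String) : Bool :=
  funcGo s.toList s.toList.reverse [] []

-- ===== PORT B =====
def func_alt (s : String) : Bool :=
  let r := (PySem.Str.slice? s none none (-1)).getD ""
  let n := PySem.Str.len s
  let p := PySem.Str.find s "*"
  let p := if p = -1 then n else p
  let q := PySem.Str.find r "*"
  let q := if q = -1 then n else q
  let k := min p q
  PySem.Str.slice s none (some k) == PySem.Str.slice r none (some k)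

-- ===== PRECONDITION & SPEC =====
def Spec_func (s : String) (out : Bool) : Prop := out = func_alt s
instance (s : String) (out : Bool) : Decidable (Spec_func s out) := by unfold Spec_func; infer_instance

-- ===== CLAIM (what is proved, stated in full; the proofs are below) =====
def Claim_equal_func : Prop := ∀ (s : String), Dom_func s → Spec_func s (func s)

-- ===== LEMMAS AND PROOFS =====

-- index of the first '*' in a list, length if none
def findStar : List Char → Nat
  | [] => 0
  | x :: xs => if x = '*' then 0 else findStar xs + 1

theorem findStar_eq_of (L : List Char) (k : Nat) (hk : L[k]? = some '*')
    (hmin : ∀ i < k, L[i]? ≠ some '*') : findStar L = k := by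
  induction L generalizing k with
  | nil => simp at hk
  | cons x xs ih =>
    cases k with
    | zero => simp at hk; simp [findStar, hk]
    | succ k =>
      have hx : x ≠ '*' := by
        have := hmin 0 (Nat.succ_pos _); simpa using this
      simp only [findStar, if_neg hx]
      have : findStar xs = k := by
        apply ih k (by simpa using hk)
        intro i hi
        have := hmin (i + 1) (by omega)
        simpa using this
      omega

theorem findStar_eq_len_of (L : List Char) (h : ∀ i : Nat, L[i]? ≠ some '*') :
    findStar L = L.length := by
  induction L with
  | nil => simp [findStar]
  | cons x xs ih =>
    have hx : x ≠ '*' := by have := h 0; simpa using this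
    simp only [findStar, if_neg hx, List.length_cons]
    have : findStar xs = xs.length := by
      apply ih; intro i; have := h (i + 1); simpa using this
    omega

theorem singleton_prefix_drop (L : List Char) (i : Nat) :
    (['*'] <+: L.drop i) ↔ L[i]? = some '*' := by
  rw [← List.head?_drop]
  cases L.drop i with
  | nil => simp
  | cons y ys =>
    constructor
    · rintro ⟨t, ht⟩; simp at ht; simp [ht.1.symm]
    · intro h; simp at h; exact ⟨ys, by simp [h]⟩

-- bridge: Python's find('*') agrees with findStar
theorem find_star_toNat (L : List Char) :
    (if PySem.Chars.find L ['*'] = -1 then (L.length : Int) else PySem.Chars.find L ['*'])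
      = (findStar L : Int) := by
  by_cases h : PySem.Chars.find L ['*'] = -1
  · rw [if_pos h]
    have hni : ¬ ['*'] <:+: L := (PySem.Chars.find_eq_neg_one_iff L ['*']).mp h
    have : ∀ i : Nat, L[i]? ≠ some '*' := by
      intro i hi
      exact hni (((singleton_prefix_drop L i).mpr hi).isInfix.trans (L.drop_suffix i).isInfix)
    rw [findStar_eq_len_of L this]
  · rw [if_neg h]
    have hpos : 0 ≤ PySem.Chars.find L ['*'] := by
      have := PySem.Chars.neg_one_le_find (s := L) (sub := ['*'])
      omega
    obtain ⟨hpre, hmin⟩ := PySem.Chars.find_spec hpos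
    have := findStar_eq_of L (PySem.Chars.find L ['*']).toNat
      ((singleton_prefix_drop L _).mp hpre)
      (fun i hi hget => hmin i hi ((singleton_prefix_drop L i).mpr hget))
    omega

-- A's loop computes the prefix comparison at the break index
theorem funcGo_eq (xs ys a b : List Char) :
    funcGo xs ys a b =
      ((a ++ xs.take (min (findStar xs) (findStar ys)))
        == (b ++ ys.take (min (findStar xs) (findStar ys)))) := by
  induction xs generalizing ys a b with
  | nil => simp [funcGo, findStar]
  | cons x xs ih =>
    cases ys with
    | nil => simp [funcGo, findStar]
    | cons y ys =>
      by_cases hx : x = '*'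
      · simp [funcGo, hx, findStar]
      · by_cases hy : y = '*'
        · simp [funcGo, hx, hy, findStar]
        · have hmin : min (findStar xs + 1) (findStar ys + 1)
              = min (findStar xs) (findStar ys) + 1 := by omega
          simp only [funcGo, hx, hy, Bool.or_self, decide_false]
          rw [ih]
          simp [findStar, hx, hy, hmin, List.append_assoc]

theorem ofList_beq (a b : List Char) : (String.ofList a == String.ofList b) = (a == b) := by
  rcases eq_or_ne a b with h | h
  · simp [h]
  · have hne : String.ofList a ≠ String.ofList b := fun hc =>
      h (by simpa using congrArg String.toList hc)
    simp [h, hne]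

theorem func_spec' (s : String) : func s = func_alt s := by
  unfold func func_alt
  rw [PySem.Str.slice?_none_none_neg_one]
  simp only [Option.getD_some]
  set L := s.toList with hL
  have hlen : PySem.Str.len s = (L.length : Int) := by
    simp [PySem.Str.len, hL]
  have hfind : PySem.Str.find s "*" = PySem.Chars.find L ['*'] := by
    simp [PySem.Str.find, ← hL]
  have hfindr : PySem.Str.find (String.ofList L.reverse) "*"
      = PySem.Chars.find L.reverse ['*'] := by
    simp [PySem.Str.find]
  rw [funcGo_eq, hlen, hfind, hfindr]
  have hp := find_star_toNat L
  have hq := find_star_toNat L.reverse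
  rw [List.length_reverse] at hq
  set p := PySem.Chars.find L ['*'] with hpdef
  set q := PySem.Chars.find L.reverse ['*'] with hqdef
  have hk : min (if p = -1 then (L.length : Int) else p)
      (if q = -1 then (L.length : Int) else q)
      = ((min (findStar L) (findStar L.reverse) : Nat) : Int) := by
    rw [hp, hq]; omega
  set m : Nat := min (findStar L) (findStar L.reverse) with hm
  rw [show ((min (findStar L) (findStar L.reverse) : Nat) : Int) = (m : Int) by rw [hm]] at hk
  rw [hk]
  have hs1 : PySem.Str.slice s none (some (m : Int)) = String.ofList (L.take m) := by
    apply String.toList_injective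
    rw [PySem.Str.toList_slice]
    simp [PySem.Chars.slice_eq_listSlice, PySem.List.slice_to_natCast, ← hL]
  have hs2 : PySem.Str.slice (String.ofList L.reverse) none (some (m : Int))
      = String.ofList (L.reverse.take m) := by
    apply String.toList_injective
    rw [PySem.Str.toList_slice]
    simp [PySem.Chars.slice_eq_listSlice, PySem.List.slice_to_natCast]
  rw [hs1, hs2, ofList_beq]
  simp

-- ===== VERDICT (by name: the statement is the Claim_ definition above) =====
theorem func_spec : Claim_equal_func := by
  intro s _
  exact func_spec' s
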